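-- pv_equiv track=rewrite | github.com/STEALTH-GOD/misinfo-factcheck | backend/services/news_retrieval_service.py | _contains_contradictory_info
-- ===== SOURCE A (Python) =====
-- def _contains_contradictory_info(claim, article_text, keywords, entities):
--     """Check if article contains information that contradicts the claim"""
--
--     # For "fled to Thailand" claims
--     if 'fled' in claim and 'thailand' in claim:
--         # Look for evidence person is still active in original location
--         if any(activity in article_text for activity in ['parliament', 'meeting', 'speech', 'address', 'kathmandu', 'official']):
--             return True
--
--     # For death/accident claims
--     if any(word in claim for word in ['death', 'died', 'killed', 'accident']):
--         if any(activity in article_text for activity in ['meeting', 'speech', 'active', 'participated']):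
--             return True
--
--     # For resignation claims
--     if 'resign' in claim:
--         if any(title in article_text for title in ['prime minister', 'minister', 'chairman']):
--             return True
--
--     return False
-- ===== SOURCE B (Python) =====
-- # Inverted-index rewrite: classify the claim once into category flags, then scan a
-- # trigger->categories index of the article keywords (shared triggers like 'meeting'
-- # and 'speech' stored once), returning True when a present trigger hits a set flag.
-- _CLAIM_TESTS = {
--     'fled_thailand': lambda c: 'fled' in c and 'thailand' in c,
--     'death':         lambda c: any(w in c for w in ('death', 'died', 'killed', 'accident')),
--     'resignation':   lambda c: 'resign' in c,
-- }
--
-- _TRIGGER_INDEX = {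
--     'parliament':     ('fled_thailand',),
--     'meeting':        ('fled_thailand', 'death'),
--     'speech':         ('fled_thailand', 'death'),
--     'address':        ('fled_thailand',),
--     'kathmandu':      ('fled_thailand',),
--     'official':       ('fled_thailand',),
--     'active':         ('death',),
--     'participated':   ('death',),
--     'prime minister': ('resignation',),
--     'minister':       ('resignation',),
--     'chairman':       ('resignation',),
-- }
--
-- def _contains_contradictory_info(claim, article_text, keywords, entities):
--     """Check if article contains information that contradicts the claim"""
--     flags = {name: test(claim) for name, test in _CLAIM_TESTS.items()}
--     if not any(flags.values()):
--         return False
--     return any(trigger in article_text and any(flags[cat] for cat in cats)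
--                for trigger, cats in _TRIGGER_INDEX.items())
-- ===== Notes on version B (the rewrite author's own statement) =====
-- stated objective: alternative
-- what changed: Inverts the traversal: instead of three claim-branch blocks each scanning their own article keyword list, B classifies the claim once into named category flags and then scans a single inverted trigger-to-categories index of article keywords (shared triggers stored once), firing when a trigger present in the article maps to a set flag.
import Mathlib
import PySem

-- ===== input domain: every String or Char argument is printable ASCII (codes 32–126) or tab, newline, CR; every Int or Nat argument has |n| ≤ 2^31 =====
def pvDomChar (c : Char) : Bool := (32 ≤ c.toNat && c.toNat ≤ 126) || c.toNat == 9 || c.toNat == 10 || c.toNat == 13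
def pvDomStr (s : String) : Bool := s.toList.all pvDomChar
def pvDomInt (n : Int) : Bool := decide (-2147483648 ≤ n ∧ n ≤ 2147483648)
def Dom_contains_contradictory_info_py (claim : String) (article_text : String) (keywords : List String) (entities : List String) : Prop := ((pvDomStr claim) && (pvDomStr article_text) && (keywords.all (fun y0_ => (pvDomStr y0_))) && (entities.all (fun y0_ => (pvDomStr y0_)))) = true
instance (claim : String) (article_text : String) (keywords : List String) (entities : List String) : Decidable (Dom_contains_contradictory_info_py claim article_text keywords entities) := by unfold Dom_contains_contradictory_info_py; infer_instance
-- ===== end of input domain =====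

-- B: inverted index — claim classified into category flags once, article scanned via a trigger->categories map (simpler decomposition; same results).

-- ===== PORT A =====
def contains_contradictory_info_py (claim : String) (article_text : String) (keywords : List String) (entities : List String) : Bool :=
  -- if 'fled' in claim and 'thailand' in claim: if any(activity in article_text ...): return True
  if PySem.Str.isIn "fled" claim && PySem.Str.isIn "thailand" claim &&
     (["parliament", "meeting", "speech", "address", "kathmandu", "official"].any
        (fun activity => PySem.Str.isIn activity article_text)) then true
  -- if any(word in claim for word in ['death','died','killed','accident']): if any(...): return True
  else if (["death", "died", "killed", "accident"].any (fun word => PySem.Str.isIn word claim)) &&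
          (["meeting", "speech", "active", "participated"].any
             (fun activity => PySem.Str.isIn activity article_text)) then true
  -- if 'resign' in claim: if any(title in article_text ...): return True
  else if PySem.Str.isIn "resign" claim &&
          (["prime minister", "minister", "chairman"].any
             (fun title => PySem.Str.isIn title article_text)) then true
  else false

-- ===== PORT B =====
-- B: claim classified once into named category flags; an inverted trigger->categories
-- index over the article keywords is then scanned, firing on any present trigger whose flag is set.
-- (Source B's flags dict is ported as an association list with first-match lookup, per the type convention.)
def pvClaimFlags (claim : String) : List (String × Bool) :=
  [ ("fled_thailand", PySem.Str.isIn "fled" claim && PySem.Str.isIn "thailand" claim),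
    ("death", ["death", "died", "killed", "accident"].any (fun w => PySem.Str.isIn w claim)),
    ("resignation", PySem.Str.isIn "resign" claim) ]

def pvTriggerIndex : List (String × List String) :=
  [ ("parliament", ["fled_thailand"]),
    ("meeting", ["fled_thailand", "death"]),
    ("speech", ["fled_thailand", "death"]),
    ("address", ["fled_thailand"]),
    ("kathmandu", ["fled_thailand"]),
    ("official", ["fled_thailand"]),
    ("active", ["death"]),
    ("participated", ["death"]),
    ("prime minister", ["resignation"]),
    ("minister", ["resignation"]),
    ("chairman", ["resignation"]) ]

-- first-match lookup (flags[cat]); all categories are present, so the default is never hit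
def pvFlagLookup (flags : List (String × Bool)) (cat : String) : Bool :=
  match flags with
  | [] => false
  | (k, v) :: rest => if k == cat then v else pvFlagLookup rest cat

def contains_contradictory_info_py_alt (claim : String) (article_text : String) (keywords : List String) (entities : List String) : Bool :=
  let flags := pvClaimFlags claim
  if !(flags.any (fun p => p.2)) then false
  else pvTriggerIndex.any (fun tc =>
    PySem.Str.isIn tc.1 article_text && tc.2.any (fun cat => pvFlagLookup flags cat))

-- ===== PRECONDITION & SPEC =====
def Spec_contains_contradictory_info_py (claim : String) (article_text : String) (keywords : List String) (entities : List String) (out : Bool) : Prop := out = contains_contradictory_info_py_alt claim article_text keywords entities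
instance (claim : String) (article_text : String) (keywords : List String) (entities : List String) (out : Bool) : Decidable (Spec_contains_contradictory_info_py claim article_text keywords entities out) := by unfold Spec_contains_contradictory_info_py; infer_instance

-- ===== CLAIM (what is proved, stated in full; the proofs are below) =====
def Claim_equal_contains_contradictory_info_py : Prop := ∀ (claim : String) (article_text : String) (keywords : List String) (entities : List String), Dom_contains_contradictory_info_py claim article_text keywords entities → Spec_contains_contradictory_info_py claim article_text keywords entities (contains_contradictory_info_py claim article_text keywords entities)

-- ===== LEMMAS AND PROOFS =====

-- ===== VERDICT (by name: the statement is the Claim_ definition above) =====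
-- pure boolean bridge: A's three-branch form equals B's flag-then-index form, for any atoms
theorem pvBoolBridge (f1 f2 f3 b1 b2 b3 b4 b5 b6 b7 b8 b9 b10 b11 : Bool) :
    (if (f1 && (b1 || (b2 || (b3 || (b4 || (b5 || (b6 || false))))))) = true then true
     else if (f2 && (b2 || (b3 || (b7 || (b8 || false))))) = true then true
     else if (f3 && (b9 || (b10 || (b11 || false)))) = true then true
     else false)
    = (if (!(f1 || (f2 || (f3 || false)))) = true then false
       else
         b1 && (f1 || false) ||
           (b2 && (f1 || (f2 || false)) ||
             (b3 && (f1 || (f2 || false)) ||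
               (b4 && (f1 || false) ||
                 (b5 && (f1 || false) ||
                   (b6 && (f1 || false) ||
                     (b7 && (f2 || false) ||
                       (b8 && (f2 || false) ||
                         (b9 && (f3 || false) ||
                           (b10 && (f3 || false) ||
                             (b11 && (f3 || false) || false))))))))))) := by
  revert f1 f2 f3 b1 b2 b3 b4 b5 b6 b7 b8 b9 b10 b11
  decide

theorem contains_contradictory_info_py_spec : Claim_equal_contains_contradictory_info_py := by
  intro claim article_text keywords entities _
  unfold Spec_contains_contradictory_info_py
  simp only [contains_contradictory_info_py, contains_contradictory_info_py_alt,
    pvClaimFlags, pvTriggerIndex, pvFlagLookup, List.any_cons, List.any_nil,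
    String.reduceBEq, BEq.rfl, if_true, if_false, Bool.false_eq_true]
  exact pvBoolBridge _ _ _ _ _ _ _ _ _ _ _ _ _ _
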